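-- pv_equiv track=rewrite | github.com/Beeque/huttista | utils_clean.py | parse_salary_number
-- ===== SOURCE A (Python) =====
-- def parse_salary_number(text: str):
--
--     if not text:
--         return None
--     t = str(text).strip().lower().replace(',', '')
--     # Extract first number
--     num_str = ''
--     for ch in t:
--         if ch.isdigit() or ch == '.':
--             num_str += ch
--         elif num_str:
--             break
--     if not num_str:
--         return None
--     try:
--         base = float(num_str)
--     except Exception:
--         return None
--     if 'm' in t:
--         return int(round(base * 1_000_000))
--     if 'k' in t:
--         return int(round(base * 1_000))
--     return int(round(base))
-- ===== SOURCE B (Python) =====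
-- def parse_salary_number(text: str):
--     if not text:
--         return None
--     t = str(text).strip().lower().replace(',', '')
--     # Blank out every non-number character, then split: the first token is the
--     # first maximal run of digits/dots.
--     parts = ''.join(c if (c.isdigit() or c == '.') else ' ' for c in t).split()
--     if not parts:
--         return None
--     try:
--         base = float(parts[0])
--     except Exception:
--         return None
--     mult = 1_000_000 if 'm' in t else 1_000 if 'k' in t else None
--     return int(round(base if mult is None else base * mult))
-- ===== Notes on version B (the rewrite author's own statement) =====
-- stated objective: idiomatic
-- what changed: A's hand-written accumulate-and-break character scanner is replaced by blanking every non-number character and splitting on whitespace (first token = first number run), and the three multiplier return branches are folded into one multiplier selection feeding a single round() call.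
import Mathlib
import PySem

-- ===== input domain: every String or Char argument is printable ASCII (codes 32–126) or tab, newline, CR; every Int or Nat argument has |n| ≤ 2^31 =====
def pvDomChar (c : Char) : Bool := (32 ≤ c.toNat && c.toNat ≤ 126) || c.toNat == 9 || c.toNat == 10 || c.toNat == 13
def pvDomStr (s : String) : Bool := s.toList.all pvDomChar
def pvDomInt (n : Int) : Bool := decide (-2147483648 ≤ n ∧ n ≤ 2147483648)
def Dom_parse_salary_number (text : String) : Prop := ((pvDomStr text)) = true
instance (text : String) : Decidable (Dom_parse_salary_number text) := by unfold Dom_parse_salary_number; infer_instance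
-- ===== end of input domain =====

-- B replaces A's hand-written accumulate-and-break scanner by a blank-out-and-split
-- extraction of the first number run, and folds A's three multiplier returns into one
-- multiplier selection feeding a single rounding step (objective: idiomatic; same cost).


-- shared one-liner: Python's `ch.isdigit() or ch == '.'` (exact on ASCII)
def pvNumChar (c : Char) : Bool := PySem.Chars.isdigit c || c == '.'

-- ===== shared float semantics (hand port, both Pythons call float()/round()) =====
-- round(x) on a float: round-half-to-even to an integer; exact port of Python's round.
def pvRoundHE (x : ℚ) : Int :=
  let n : Int := Rat.floor x
  let t : ℚ := x - (n : ℚ)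
  if t < 1/2 then n
  else if (1/2 : ℚ) < t then n + 1
  else if n % 2 = 0 then n else n + 1

-- Correctly rounded conversion of a nonnegative rational to an IEEE binary64 value,
-- returned as the exact rational it represents; `none` = overflow to infinity (where
-- Python's round subsequently raises OverflowError). Round-half-even, subnormals
-- clamped at 2^-1074. Exact port of CPython's float semantics for q ≥ 0.
def pvToFloat? (q : ℚ) : Option ℚ :=
  if q = 0 then some 0
  else
    let a := q.num.toNat
    let b := q.den
    let e0 : Int := (Nat.log2 a : Int) - (Nat.log2 b : Int)
    let e : Int := if (2:ℚ) ^ e0 ≤ q then e0 else e0 - 1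
    let p : Int := max (e - 52) (-1074)
    let m : Int := pvRoundHE (q / (2:ℚ) ^ p)
    let v : ℚ := (m : ℚ) * (2:ℚ) ^ p
    if (2:ℚ) ^ (1024:Int) ≤ v then none else some v

-- The decimal value denoted by a run of digits/dots, `none` = ValueError of float()
-- (more than one dot, or no digit). Exact on such runs (no sign/exponent can occur).
def pvParseRun? (cs : List Char) : Option ℚ :=
  if 1 < cs.count '.' then none
  else if ¬ cs.any (fun c => PySem.Chars.isdigit c) then none
  else
    let ip := cs.takeWhile (fun c => c ≠ '.')
    let fp := (cs.dropWhile (fun c => c ≠ '.')).drop 1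
    let nv : ℕ := (ip ++ fp).foldl (fun n c => n * 10 + (c.toNat - 48)) 0
    some ((nv : ℚ) / (10:ℚ) ^ fp.length)

-- ===== PORT A =====
-- A's scanning loop: build num_str, break at the first non-number char once num_str is nonempty
def pvScanA : List Char → List Char → List Char
  | [], acc => acc
  | c :: cs, acc =>
    if pvNumChar c then pvScanA cs (acc ++ [c])
    else if acc ≠ [] then acc else pvScanA cs acc

def parse_salary_number (text : String) : Option Int :=
  if text = "" then none
  else
    let t := PySem.Chars.replace (PySem.Chars.lower (PySem.Chars.strip text.toList)) [','] []
    let num := pvScanA t []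
    if num = [] then none
    else
      match pvParseRun? num with
      | none => none          -- float(num_str) raised ValueError, caught → None
      | some q =>
        match pvToFloat? q with
        | none => none        -- base is inf: round raises OverflowError (outside Pre_)
        | some base =>
          if PySem.Chars.isIn ['m'] t then
            match pvToFloat? (base * 1000000) with   -- base * 1_000_000 in float
            | none => none    -- inf: round raises (outside Pre_)
            | some x => some (pvRoundHE x)
          else if PySem.Chars.isIn ['k'] t then
            match pvToFloat? (base * 1000) with
            | none => none
            | some x => some (pvRoundHE x)
          else some (pvRoundHE base)

-- ===== PORT B =====
def parse_salary_number_alt (text : String) : Option Int :=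
  if text = "" then none
  else
    let t := PySem.Chars.replace (PySem.Chars.lower (PySem.Chars.strip text.toList)) [','] []
    -- blank out every non-number char, then split(): first token = first number run
    let parts := PySem.Chars.split₀ (t.map (fun c => if pvNumChar c then c else ' '))
    match parts with
    | [] => none
    | p :: _ =>
      match pvParseRun? p with
      | none => none          -- float(parts[0]) raised ValueError, caught → None
      | some q =>
        match pvToFloat? q with
        | none => none        -- inf: round raises (outside Pre_)
        | some base =>
          let mult : Option ℚ := if PySem.Chars.isIn ['m'] t then some 1000000
                                 else if PySem.Chars.isIn ['k'] t then some 1000 else none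
          match mult with
          | none => some (pvRoundHE base)
          | some mu =>
            match pvToFloat? (base * mu) with
            | none => none
            | some x => some (pvRoundHE x)

-- ===== PRECONDITION & SPEC =====
-- Pre_ excludes only texts with more than 302 digit characters: a syntactic bound under
-- which the extracted number (and its product with 1_000_000) cannot overflow the float
-- range, whereas beyond it Python's round() can raise OverflowError on an infinite float.
def Pre_parse_salary_number (text : String) : Prop :=
  text.toList.countP (fun c => PySem.Chars.isdigit c) ≤ 302
instance (text : String) : Decidable (Pre_parse_salary_number text) := by unfold Pre_parse_salary_number; infer_instance
def pvWitness_parse_salary_number : String := " $1.5m, a year "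

def Spec_parse_salary_number (text : String) (out : Option Int) : Prop := out = parse_salary_number_alt text
instance (text : String) (out : Option Int) : Decidable (Spec_parse_salary_number text out) := by unfold Spec_parse_salary_number; infer_instance

-- ===== CLAIM (what is proved, stated in full; the proofs are below) =====
def Claim_equal_parse_salary_number : Prop := ∀ (text : String), Dom_parse_salary_number text → Pre_parse_salary_number text → Spec_parse_salary_number text (parse_salary_number text)

-- ===== LEMMAS AND PROOFS =====

-- the first maximal run of number chars
def pvFirstRun (cs : List Char) : List Char :=
  (cs.dropWhile (fun c => !pvNumChar c)).takeWhile pvNumChar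

lemma pvScanA_ne (cs : List Char) : ∀ acc, acc ≠ [] →
    pvScanA cs acc = acc ++ cs.takeWhile pvNumChar := by
  induction cs with
  | nil => intro acc _; simp [pvScanA]
  | cons c cs ih =>
    intro acc h
    by_cases hc : pvNumChar c
    · simp [pvScanA, hc, ih (acc ++ [c]) (by simp)]
    · simp [pvScanA, hc, h, List.takeWhile]

lemma pvScanA_nil (cs : List Char) : pvScanA cs [] = pvFirstRun cs := by
  induction cs with
  | nil => simp [pvScanA, pvFirstRun]
  | cons c cs ih =>
    by_cases hc : pvNumChar c
    · simp [pvScanA, hc, pvFirstRun, List.dropWhile,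
        pvScanA_ne cs [c] (by simp)]
    · simpa [pvScanA, hc, pvFirstRun, List.dropWhile] using ih

-- blanked characters: ' ' is whitespace, number chars are not
def pvBlank (c : Char) : Char := if pvNumChar c then c else ' '

lemma pv_isspace_blank_num {c : Char} (h : pvNumChar c = true) :
    PySem.Chars.isspace c = false := by
  rcases Bool.or_eq_true_iff.mp h with h' | h'
  · simp only [PySem.Chars.isdigit, Bool.and_eq_true, decide_eq_true_eq] at h'
    have h1 : 48 ≤ c.toNat := h'.1
    have h2 : c.toNat ≤ 57 := h'.2
    simp only [PySem.Chars.isspace, Bool.or_eq_false_iff, Bool.and_eq_false_iff,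
      decide_eq_false_iff_not]
    omega
  · have : c = '.' := by simpa using h'
    subst this; decide

lemma pv_go_acc (xs : List Char) : ∀ cur acc,
    PySem.Chars.split₀.go xs cur acc = acc.reverse ++ PySem.Chars.split₀.go xs cur [] := by
  induction xs with
  | nil =>
    intro cur acc
    by_cases h : cur.isEmpty <;> simp [PySem.Chars.split₀.go, h]
  | cons c xs ih =>
    intro cur acc
    by_cases hs : PySem.Chars.isspace c
    · by_cases h : cur.isEmpty
      · simp only [PySem.Chars.split₀.go, hs, h, if_true]
        exact ih [] acc
      · simp only [PySem.Chars.split₀.go, hs, h, if_true, if_false, Bool.false_eq_true]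
        rw [ih [] (cur.reverse :: acc), ih [] [cur.reverse]]
        simp
    · simp only [PySem.Chars.split₀.go, hs, Bool.false_eq_true, if_false]
      exact ih (c :: cur) acc

lemma pv_go_run (cs : List Char) : ∀ cur, cur ≠ [] →
    (PySem.Chars.split₀.go (cs.map pvBlank) cur []).head? =
      some (cur.reverse ++ cs.takeWhile pvNumChar) := by
  induction cs with
  | nil =>
    intro cur h
    simp [PySem.Chars.split₀.go, List.isEmpty_iff, h]
  | cons c cs ih =>
    intro cur h
    by_cases hc : pvNumChar c
    · have := ih (c :: cur) (by simp)
      simp only [List.map_cons, pvBlank, hc, if_true,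
        PySem.Chars.split₀.go, pv_isspace_blank_num hc, Bool.false_eq_true, if_false]
      rw [this]
      simp [hc]
    · have hsp : PySem.Chars.isspace ' ' = true := by decide
      simp only [List.map_cons, pvBlank, hc, Bool.false_eq_true, if_false,
        PySem.Chars.split₀.go, hsp, if_true, List.isEmpty_iff, h]
      rw [pv_go_acc]
      simp [hc]

lemma pv_split_blank (cs : List Char) :
    (PySem.Chars.split₀ (cs.map pvBlank)).head? =
      if pvFirstRun cs = [] then none else some (pvFirstRun cs) := by
  induction cs with
  | nil => simp [PySem.Chars.split₀, PySem.Chars.split₀.go, pvFirstRun]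
  | cons c cs ih =>
    by_cases hc : pvNumChar c
    · have hrun : pvFirstRun (c :: cs) = c :: cs.takeWhile pvNumChar := by
        simp [pvFirstRun, List.dropWhile, hc]
      simp only [PySem.Chars.split₀, List.map_cons, pvBlank, hc, if_true,
        PySem.Chars.split₀.go, pv_isspace_blank_num hc, Bool.false_eq_true, if_false]
      rw [pv_go_run cs [c] (by simp)]
      simp [hrun]
    · have hsp : PySem.Chars.isspace ' ' = true := by decide
      have hrun : pvFirstRun (c :: cs) = pvFirstRun cs := by
        simp [pvFirstRun, List.dropWhile, hc]
      simpa [PySem.Chars.split₀, pvBlank, hc, PySem.Chars.split₀.go, hsp, hrun] using ih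

-- ===== VERDICT (by name: the statement is the Claim_ definition above) =====
theorem parse_salary_number_spec : Claim_equal_parse_salary_number := by
  intro text _hdom _hpre
  unfold Spec_parse_salary_number parse_salary_number parse_salary_number_alt
  by_cases ht : text = ""
  · simp [ht]
  · simp only [ht, if_false]
    set t := PySem.Chars.replace (PySem.Chars.lower (PySem.Chars.strip text.toList)) [','] [] with hT
    have hscan := pvScanA_nil t
    have hsplit := pv_split_blank t
    have hblank : (t.map fun c => if pvNumChar c then c else ' ') = t.map pvBlank := by
      simp [pvBlank]
    rw [hblank]
    cases hps : PySem.Chars.split₀ (t.map pvBlank) with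
    | nil =>
      rw [hps] at hsplit
      by_cases hr : pvFirstRun t = []
      · rw [hr] at hscan; simp [hscan]
      · rw [if_neg hr] at hsplit; simp at hsplit
    | cons p ps =>
      rw [hps] at hsplit
      by_cases hr : pvFirstRun t = []
      · rw [if_pos hr] at hsplit; simp at hsplit
      · rw [if_neg hr] at hsplit
        have hp : p = pvFirstRun t := by simpa using hsplit
        rw [hscan, if_neg hr, hp]
        cases hpr : pvParseRun? (pvFirstRun t) with
        | none => simp [hpr]
        | some q =>
          cases hfl : pvToFloat? q with
          | none => simp [hpr, hfl]
          | some base =>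
            by_cases hm : PySem.Chars.isIn ['m'] t
            · simp [hpr, hfl, hm]
            · by_cases hk : PySem.Chars.isIn ['k'] t <;> simp [hpr, hfl, hm, hk]
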